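-- pv_equiv track=rewrite | github.com/ethanjensen/Latex-Documents | Combinatorics of Integer Partitions/blocks_and_holes.py | collectFinalTerms
-- ===== SOURCE A (Python) =====
-- def collectFinalTerms(final_terms):
--     total = 0
--     badvalues = []
--     for i in range (0, len(final_terms)):
--         if len(list(final_terms[i][0].values())) == 1 and list(final_terms[i][0].values())[0] == 1:
--             total = total + final_terms[i][1]
--             badvalues.append(i)
--     badvalues.reverse()
--     for i in badvalues:
--         del final_terms[i]
--     return total
-- ===== SOURCE B (Python) =====
-- def collectFinalTerms(final_terms):
--     total = sum(v for d, v in final_terms if list(d.values()) == [1])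
--     final_terms[:] = [t for t in final_terms if list(t[0].values()) != [1]]
--     return total
-- ===== Notes on version B (the rewrite author's own statement) =====
-- stated objective: simpler
-- what changed: Replaces A's index loop that records bad indices and deletes them back-to-front with a direct sum over the qualifying terms plus one filter comprehension assigned back by slice, testing the values list against [1] instead of len/index checks.
import Mathlib
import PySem

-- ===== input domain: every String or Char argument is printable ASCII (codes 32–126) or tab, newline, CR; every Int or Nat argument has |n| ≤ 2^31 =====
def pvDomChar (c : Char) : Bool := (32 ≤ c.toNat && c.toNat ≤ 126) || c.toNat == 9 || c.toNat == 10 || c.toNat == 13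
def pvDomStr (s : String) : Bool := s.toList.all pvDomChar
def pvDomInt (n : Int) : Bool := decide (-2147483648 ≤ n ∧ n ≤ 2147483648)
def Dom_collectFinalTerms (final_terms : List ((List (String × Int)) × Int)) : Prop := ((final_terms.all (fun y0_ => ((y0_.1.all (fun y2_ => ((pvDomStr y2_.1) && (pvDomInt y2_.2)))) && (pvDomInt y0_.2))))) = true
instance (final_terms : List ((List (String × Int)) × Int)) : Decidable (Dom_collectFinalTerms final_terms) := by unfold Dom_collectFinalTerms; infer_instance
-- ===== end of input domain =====

-- B replaces the mark-indices-then-delete-in-reverse loop by a sum over qualifying terms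
-- plus one filter; equivalence is about the RETURN value only (A also deletes the summed
-- terms from its argument in place; B's slice assignment leaves the list identically).

-- ===== PORT A =====
def collectFinalTerms (final_terms : List ((List (String × Int)) × Int)) : Int :=
  -- total = 0; badvalues = []; for i in range(0, len(final_terms)): …
  let st :=
    (PySem.List.pyRange 0 (PySem.List.len final_terms) 1).foldl
      (fun (st : Int × List Int) i =>
        let t := PySem.List.pyGetD final_terms i ([], 0)
        let vals := (PySem.Dict.ofList t.1).values
        if vals.length == 1 && PySem.List.pyGetD vals 0 0 == 1 then
          (st.1 + t.2, st.2 ++ [i])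
        else st)
      (0, [])
  let badvalues := st.2.reverse
  -- for i in badvalues: del final_terms[i]   (mutates the argument; the result list is unused by the return)
  let _final_terms :=
    badvalues.foldl
      (fun l i => match PySem.List.pop? l i with | some (_, l') => l' | none => l)
      final_terms
  st.1

-- ===== PORT B =====
def collectFinalTerms_alt (final_terms : List ((List (String × Int)) × Int)) : Int :=
  -- total = sum(v for d, v in final_terms if list(d.values()) == [1])
  ((final_terms.filter (fun t => (PySem.Dict.ofList t.1).values == [1])).map (·.2)).sum

-- ===== PRECONDITION & SPEC =====
def Spec_collectFinalTerms (final_terms : List ((List (String × Int)) × Int)) (out : Int) : Prop := out = collectFinalTerms_alt final_terms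
instance (final_terms : List ((List (String × Int)) × Int)) (out : Int) : Decidable (Spec_collectFinalTerms final_terms out) := by unfold Spec_collectFinalTerms; infer_instance

-- ===== CLAIM (what is proved, stated in full; the proofs are below) =====
def Claim_equal_collectFinalTerms : Prop := ∀ (final_terms : List ((List (String × Int)) × Int)), Dom_collectFinalTerms final_terms → Spec_collectFinalTerms final_terms (collectFinalTerms final_terms)

-- ===== LEMMAS AND PROOFS =====

-- the first component of A's pair-state fold ignores the badvalues component
theorem fst_foldl_pair {α β : Type} (step : Int × List β → α → Int × List β)
    (g : Int → α → Int) (hg : ∀ st a, (step st a).1 = g st.1 a)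
    (l : List α) (st : Int × List β) :
    (l.foldl step st).1 = l.foldl g st.1 := by
  induction l generalizing st with
  | nil => rfl
  | cons a l ih => rw [List.foldl_cons, List.foldl_cons, ih, hg]

-- a conditional-add fold is the sum of the mapped filter
theorem foldl_if_add_eq_sum {α : Type} (p : α → Bool) (f : α → Int) (l : List α) (x : Int) :
    l.foldl (fun acc t => if p t then acc + f t else acc) x
      = x + ((l.filter p).map f).sum := by
  induction l generalizing x with
  | nil => simp
  | cons a l ih =>
    by_cases h : p a
    · simp [h, ih, add_assoc]
    · simp [h, ih]

-- A's length-1-and-first-is-1 test is B's equality with [1]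
theorem cond_eq (vs : List Int) :
    (vs.length == 1 && PySem.List.pyGetD vs 0 0 == 1) = (vs == [1]) := by
  match vs with
  | [] => rfl
  | [a] =>
    simp [PySem.List.pyGetD, PySem.List.pyGet?, PySem.List.pyIdx?]
  | a :: b :: t => simp

-- ===== VERDICT (by name: the statement is the Claim_ definition above) =====
theorem collectFinalTerms_spec : Claim_equal_collectFinalTerms := by
  intro ft _
  show collectFinalTerms ft = collectFinalTerms_alt ft
  unfold collectFinalTerms collectFinalTerms_alt
  simp only []
  rw [fst_foldl_pair _ (fun acc i =>
        let t := PySem.List.pyGetD ft i ([], 0)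
        let vals := (PySem.Dict.ofList t.1).values
        if vals.length == 1 && PySem.List.pyGetD vals 0 0 == 1 then acc + t.2 else acc)
      (by intro st a; dsimp only; split <;> rfl)]
  rw [show PySem.List.len ft = (ft.length : Int) from rfl,
      PySem.List.foldl_pyRange_zero_pyGetD' ft ([], 0)
        (fun acc t => if ((PySem.Dict.ofList t.1).values.length == 1
            && PySem.List.pyGetD (PySem.Dict.ofList t.1).values 0 0 == 1) then acc + t.2 else acc) 0]
  rw [foldl_if_add_eq_sum]
  simp only [cond_eq]
  simp
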